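-- pv_equiv track=rewrite | github.com/Nabil-hamoudi/l1-python | exercises/TD04_listes/syracuse.py | syracuse2
-- ===== SOURCE A (Python) =====
-- def syracuse(n):
--     """ Retourne la liste des valeurs de la suite en partant de n jusqu'à 1 """
--     liste = [n]
--     while n != 1:
--         if n % 2 == 0:
--             n //= 2
--         else:
--             n = (n * 3) + 1
--         liste.append(n)
--     return liste
--
-- def syracuse2(n_max):
--     """ Retourne la liste des valeurs de la suite en partant de n jusqu'à 1 """
--     liste2 = []
--     for i in range(1, n_max + 1):
--         liste = syracuse(i)
--         liste.sort()
--         liste2.append(liste[-1])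
--     liste = liste2.copy()
--     liste2.sort()
--     rep = liste.index(liste2[-1]) + 1
--     return liste2[-1], rep
-- ===== SOURCE B (Python) =====
-- def syracuse2(n_max):
--     best = 0
--     best_i = 0
--     for i in range(1, n_max + 1):
--         n = i
--         m = i
--         while n != 1:
--             if n % 2 == 0:
--                 n //= 2
--             else:
--                 n = n * 3 + 1
--             if n > m:
--                 m = n
--         if m > best:
--             best = m
--             best_i = i
--     return best, best_i
-- ===== Notes on version B (the rewrite author's own statement) =====
-- stated objective: faster
-- what changed: B replaces A's per-number trajectory list + sort (and the final sort plus list.index scan) by a running trajectory maximum and a single-pass first-argmax over 1..n_max, keeping no lists at all.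
import Mathlib
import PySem

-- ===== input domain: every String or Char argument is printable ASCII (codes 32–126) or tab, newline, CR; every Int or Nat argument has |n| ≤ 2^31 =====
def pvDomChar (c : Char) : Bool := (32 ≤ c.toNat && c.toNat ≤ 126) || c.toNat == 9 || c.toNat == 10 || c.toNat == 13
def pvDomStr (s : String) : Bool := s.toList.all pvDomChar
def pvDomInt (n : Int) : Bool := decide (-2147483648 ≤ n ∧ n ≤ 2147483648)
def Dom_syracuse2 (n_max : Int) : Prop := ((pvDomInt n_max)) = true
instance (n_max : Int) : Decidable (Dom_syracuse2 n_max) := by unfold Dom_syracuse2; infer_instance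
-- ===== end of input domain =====

-- B replaces A's per-trajectory list building + sort and final sort/index by a running
-- trajectory maximum and a single-pass first-argmax; measurably faster (constant factor).


-- fuel bound for the Collatz while-loops of both ports (the Python loops carry no bound;
-- fuel only makes the recursions structural, both loops stop at n = 1 long before it runs out)
def collatzFuel : Nat := 100000

-- ===== PORT A =====
-- while n != 1: n = n//2 if even else 3n+1; liste.append(n)
def syracuseLoop : Nat → Int → List Int → List Int
  | 0, _, acc => acc.reverse
  | f+1, n, acc =>
    if n = 1 then acc.reverse
    else
      let n' := if PySem.Int.mod n 2 = 0 then PySem.Int.floordiv n 2 else n * 3 + 1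
      syracuseLoop f n' (n' :: acc)

def syracuseA (n : Int) : List Int := syracuseLoop collatzFuel n [n]

def syracuse2 (n_max : Int) : Int × Int :=
  let liste2 := (PySem.List.pyRange 1 (n_max + 1) 1).foldl
    (fun acc i =>
      -- liste = syracuse(i); liste.sort(); liste2.append(liste[-1])  (liste is nonempty, so
      -- the .getD 0 default of liste[-1] is never used)
      acc ++ [(PySem.List.pyGet? (PySem.List.sorted (syracuseA i) (fun x => x) false) (-1)).getD 0])
    []
  let liste := liste2
  let l2s := PySem.List.sorted liste2 (fun x => x) false
  let m := (PySem.List.pyGet? l2s (-1)).getD 0      -- liste2[-1]: IndexError when liste2 = [] (outside Pre_)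
  let rep := (((PySem.List.index? liste m).getD 0 : Nat) : Int) + 1
  (m, rep)

-- ===== PORT B =====
def trajLoop : Nat → Int → Int → Int
  | 0, _, m => m
  | f+1, n, m =>
    if n = 1 then m
    else
      let n' := if PySem.Int.mod n 2 = 0 then PySem.Int.floordiv n 2 else n * 3 + 1
      trajLoop f n' (if n' > m then n' else m)

def syracuse2_alt (n_max : Int) : Int × Int :=
  (PySem.List.pyRange 1 (n_max + 1) 1).foldl
    (fun (bb : Int × Int) i =>
      let m := trajLoop collatzFuel i i
      if m > bb.1 then (m, i) else bb)
    (0, 0)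

-- ===== PRECONDITION & SPEC =====
-- Pre_ excludes n_max < 1, where A raises IndexError (liste2 is empty at liste2[-1]).
def Pre_syracuse2 (n_max : Int) : Prop := 1 ≤ n_max
instance (n_max : Int) : Decidable (Pre_syracuse2 n_max) := by unfold Pre_syracuse2; infer_instance
def pvWitness_syracuse2 : Int := 1

def Spec_syracuse2 (n_max : Int) (out : Int × Int) : Prop := out = syracuse2_alt n_max
instance (n_max : Int) (out : Int × Int) : Decidable (Spec_syracuse2 n_max out) := by unfold Spec_syracuse2; infer_instance

-- ===== CLAIM (what is proved, stated in full; the proofs are below) =====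
def Claim_equal_syracuse2 : Prop := ∀ (n_max : Int), Dom_syracuse2 n_max → Pre_syracuse2 n_max → Spec_syracuse2 n_max (syracuse2 n_max)

-- ===== LEMMAS AND PROOFS =====

-- the running trajectory maximum B computes for start i
def trajMax (i : Int) : Int := trajLoop collatzFuel i i

-- the two while-loops run in lockstep: B's running maximum is a member of and an upper
-- bound of A's trajectory list
theorem loop_rel (f : Nat) : ∀ (n m : Int) (acc : List Int),
    m ∈ acc → (∀ x ∈ acc, x ≤ m) →
    trajLoop f n m ∈ syracuseLoop f n acc ∧ ∀ x ∈ syracuseLoop f n acc, x ≤ trajLoop f n m := by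
  induction f with
  | zero =>
    intro n m acc hm hub
    simp only [trajLoop, syracuseLoop, List.mem_reverse]
    exact ⟨hm, hub⟩
  | succ f ih =>
    intro n m acc hm hub
    simp only [trajLoop, syracuseLoop]
    by_cases h1 : n = 1
    · simp only [h1, reduceIte, List.mem_reverse]
      exact ⟨hm, hub⟩
    · simp only [if_neg h1]
      set n' := if PySem.Int.mod n 2 = 0 then PySem.Int.floordiv n 2 else n * 3 + 1 with hn'
      by_cases hgt : n' > m
      · simp only [if_pos hgt]
        refine ih n' n' (n' :: acc) (List.mem_cons_self ..) ?_
        intro x hx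
        rcases List.mem_cons.1 hx with rfl | hx
        · exact le_refl _
        · exact le_trans (hub x hx) (le_of_lt hgt)
      · simp only [if_neg hgt]
        refine ih n' m (n' :: acc) (List.mem_cons_of_mem _ hm) ?_
        intro x hx
        rcases List.mem_cons.1 hx with rfl | hx
        · exact le_of_not_gt hgt
        · exact hub x hx

theorem trajMax_mem_ub (i : Int) :
    trajMax i ∈ syracuseA i ∧ ∀ x ∈ syracuseA i, x ≤ trajMax i := by
  exact loop_rel collatzFuel i i [i] (List.mem_singleton.2 rfl)
    (fun x hx => le_of_eq (List.mem_singleton.1 hx))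

-- last element of a (≤)-pairwise list bounds all elements
theorem pairwise_le_getLast : ∀ (l : List Int) (h : l ≠ []),
    l.Pairwise (· ≤ ·) → ∀ x ∈ l, x ≤ l.getLast h := by
  intro l
  induction l with
  | nil => intro h; exact absurd rfl h
  | cons a t ih =>
    intro _ hp x hx
    rcases List.pairwise_cons.1 hp with ⟨ha, ht⟩
    cases t with
    | nil =>
      simp only [List.mem_singleton] at hx
      simp [hx, List.getLast]
    | cons b u =>
      have htne : (b :: u) ≠ [] := by simp
      rw [List.getLast_cons htne]
      rcases List.mem_cons.1 hx with rfl | hx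
      · exact ha _ (List.getLast_mem htne)
      · exact ih htne ht x hx

-- sorted(l)[-1] is the (unique) greatest element of l
theorem sorted_last_eq (l : List Int) (g : Int)
    (hmem : g ∈ l) (hub : ∀ x ∈ l, x ≤ g) :
    (PySem.List.pyGet? (PySem.List.sorted l (fun x => x) false) (-1)).getD 0 = g := by
  set s := PySem.List.sorted l (fun x => x) false with hs
  have hperm : s.Perm l := PySem.List.sorted_perm ..
  have hsne : s ≠ [] := by
    intro h; rw [h] at hperm
    rw [hperm.symm.eq_nil] at hmem
    exact absurd hmem (List.not_mem_nil)
  have hlast : s.getLast? = some (s.getLast hsne) := List.getLast?_eq_some_getLast ..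
  rw [PySem.List.pyGet?_neg_one, hlast, Option.getD_some]
  have hpw : s.Pairwise (· ≤ ·) := by
    have := PySem.List.sorted_pairwise (xs := l) (key := fun x => x)
    simpa using this
  have hlmem : s.getLast hsne ∈ l := hperm.mem_iff.1 (List.getLast_mem hsne)
  have h1 : s.getLast hsne ≤ g := hub _ hlmem
  have h2 : g ≤ s.getLast hsne :=
    pairwise_le_getLast s hsne hpw g (hperm.mem_iff.2 hmem)
  omega

-- A's per-i appended value equals B's trajectory maximum
theorem aval_eq_trajMax (i : Int) :
    (PySem.List.pyGet? (PySem.List.sorted (syracuseA i) (fun x => x) false) (-1)).getD 0 = trajMax i := by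
  exact sorted_last_eq _ _ (trajMax_mem_ub i).1 (trajMax_mem_ub i).2

-- B's fold step
def stB (bb : Int × Int) (i : Int) : Int × Int :=
  if trajLoop collatzFuel i i > bb.1 then (trajLoop collatzFuel i i, i) else bb

-- A's liste2 as a map
theorem liste2_eq_map (r : List Int) (init : List Int) :
    r.foldl (fun acc i =>
      acc ++ [(PySem.List.pyGet? (PySem.List.sorted (syracuseA i) (fun x => x) false) (-1)).getD 0]) init
    = init ++ r.map trajMax := by
  induction r generalizing init with
  | nil => simp
  | cons a t ih =>
    rw [List.foldl_cons, ih, aval_eq_trajMax]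
    simp

-- the single-pass argmax invariant over the remaining range [k, k+len)
theorem argmax_inv (len : Nat) : ∀ (k b bi : Int), 1 ≤ k →
    b ∈ (PySem.List.pyRange 1 k 1).map trajMax →
    (∀ x ∈ (PySem.List.pyRange 1 k 1).map trajMax, x ≤ b) →
    (∃ j : Nat, PySem.List.index? ((PySem.List.pyRange 1 k 1).map trajMax) b = some j ∧ bi = (j : Int) + 1) →
    let fin := (PySem.List.pyRange k (k + len) 1).foldl stB (b, bi)
    let l2 := (PySem.List.pyRange 1 (k + len) 1).map trajMax
    fin.1 ∈ l2 ∧ (∀ x ∈ l2, x ≤ fin.1) ∧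
      (∃ j : Nat, PySem.List.index? l2 fin.1 = some j ∧ fin.2 = (j : Int) + 1) := by
  induction len with
  | zero =>
    intro k b bi hk hm hub hidx
    simp only [Nat.cast_zero, add_zero, PySem.List.pyRange_one_eq_nil (le_refl k),
      List.foldl_nil]
    exact ⟨hm, hub, hidx⟩
  | succ len ih =>
    intro k b bi hk hm hub hidx
    have hklt : k < k + ((len:Nat)+1 : Nat) := by push_cast; omega
    rw [PySem.List.pyRange_one_cons hklt, List.foldl_cons]
    have hsplit : PySem.List.pyRange 1 (k + 1) 1 = PySem.List.pyRange 1 k 1 ++ [k] :=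
      PySem.List.pyRange_one_succ_right hk
    have hlen : (((PySem.List.pyRange 1 k 1).map trajMax).length : Int) = k - 1 := by
      simp [PySem.List.length_pyRange_one]
      omega
    have hkk : k + ((len:Nat)+1 : Nat) = (k + 1) + (len : Nat) := by push_cast; ring
    rw [hkk]
    by_cases hgt : trajLoop collatzFuel k k > b
    · have hst : stB (b, bi) k = (trajMax k, k) := by
        simp [stB, trajMax, if_pos hgt]
      rw [hst]
      refine ih (k + 1) (trajMax k) k (by omega) ?_ ?_ ?_
      · rw [hsplit]; simp
      · intro x hx
        rw [hsplit] at hx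
        simp only [List.map_append, List.mem_append, List.map_cons, List.map_nil,
          List.mem_singleton] at hx
        rcases hx with hx | rfl
        · exact le_trans (hub x hx) (le_of_lt hgt)
        · exact le_refl _
      · refine ⟨((PySem.List.pyRange 1 k 1).map trajMax).length, ?_, by omega⟩
        rw [hsplit, List.map_append]
        simp only [List.map_cons, List.map_nil]
        refine PySem.List.index?_append_singleton_self ((PySem.List.pyRange 1 k 1).map trajMax) (trajMax k) ?_
        intro hmem'
        exact absurd (hub _ hmem') (not_le.2 hgt)
    · have hst : stB (b, bi) k = (b, bi) := by
        simp [stB, if_neg hgt]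
      rw [hst]
      refine ih (k + 1) b bi (by omega) ?_ ?_ ?_
      · rw [hsplit]; simp only [List.map_append, List.mem_append]; exact Or.inl hm
      · intro x hx
        rw [hsplit] at hx
        simp only [List.map_append, List.mem_append, List.map_cons, List.map_nil,
          List.mem_singleton] at hx
        rcases hx with hx | rfl
        · exact hub x hx
        · exact le_of_not_gt hgt
      · rcases hidx with ⟨j, hj, hbi⟩
        refine ⟨j, ?_, hbi⟩
        rw [hsplit, List.map_append]
        simp only [List.map_cons, List.map_nil]
        rw [PySem.List.index?_append_of_mem _ hm, hj]

theorem trajMax_one : trajMax 1 = 1 := by decide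

-- ===== VERDICT (by name: the statement is the Claim_ definition above) =====
theorem syracuse2_spec : Claim_equal_syracuse2 := by
  intro n_max _ hpre
  unfold Spec_syracuse2 syracuse2 syracuse2_alt
  have hpre' : (1:Int) ≤ n_max := hpre
  -- peel the first loop iteration (i = 1) off B's fold
  have hcons : PySem.List.pyRange 1 (n_max + 1) 1 = 1 :: PySem.List.pyRange 2 (n_max + 1) 1 :=
    PySem.List.pyRange_one_cons (by omega)
  have hlen : (2:Int) + ((n_max - 1).toNat : Nat) = n_max + 1 := by
    have := Int.toNat_of_nonneg (show (0:Int) ≤ n_max - 1 by omega)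
    omega
  have h12 : PySem.List.pyRange 1 2 1 = [1] := by decide
  have hinv := argmax_inv (n_max - 1).toNat 2 (trajMax 1) 1 (by omega)
    (by rw [h12]; simp)
    (by rw [h12]; intro x hx; simp at hx; omega)
    ⟨0, by rw [h12]; simp, by omega⟩
  rw [hlen] at hinv
  rcases hinv with ⟨hmem, hub, j, hj, hbi⟩
  -- rewrite A's liste2 as a map and B's fold via stB
  rw [liste2_eq_map]
  simp only [List.nil_append]
  have hBfold : (PySem.List.pyRange 1 (n_max + 1) 1).foldl
      (fun (bb : Int × Int) i =>
        let m := trajLoop collatzFuel i i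
        if m > bb.1 then (m, i) else bb) (0, 0)
      = (PySem.List.pyRange 2 (n_max + 1) 1).foldl stB (trajMax 1, 1) := by
    rw [hcons, List.foldl_cons]
    have h10 : trajLoop collatzFuel 1 1 > (0:Int) := by rw [show trajLoop collatzFuel 1 1 = 1 from trajMax_one]; omega
    simp only [if_pos h10]
    rfl
  rw [hBfold]
  set fin := (PySem.List.pyRange 2 (n_max + 1) 1).foldl stB (trajMax 1, 1) with hfin
  have hm : (PySem.List.pyGet? (PySem.List.sorted ((PySem.List.pyRange 1 (n_max + 1) 1).map trajMax) (fun x => x) false) (-1)).getD 0 = fin.1 :=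
    sorted_last_eq _ _ hmem hub
  rw [hm, hj]
  simp only [Option.getD_some]
  exact Prod.ext rfl (by omega)
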